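-- pv_equiv track=rewrite | github.com/yousstone/python3_learning_note | map_normlize.py | normailize
-- ===== SOURCE A (Python) =====
-- def normailize(name):
-- 	new_name = ''
-- 	for index ,char in enumerate(name):
-- 		if index == 0:
-- 			new_name += char.upper()
-- 		elif index >= 1:
-- 			new_name += char.lower()
-- 	return new_name
-- ===== SOURCE B (Python) =====
-- def normailize(name):
-- 	return name[:1].upper() + name[1:].lower()
-- ===== Notes on version B (the rewrite author's own statement) =====
-- stated objective: idiomatic
-- what changed: Replaces the index-tracking enumerate loop with per-character string concatenation by a single closed-form slice expression: uppercase the one-char head slice, lowercase the tail slice, concatenate once.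
import Mathlib
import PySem

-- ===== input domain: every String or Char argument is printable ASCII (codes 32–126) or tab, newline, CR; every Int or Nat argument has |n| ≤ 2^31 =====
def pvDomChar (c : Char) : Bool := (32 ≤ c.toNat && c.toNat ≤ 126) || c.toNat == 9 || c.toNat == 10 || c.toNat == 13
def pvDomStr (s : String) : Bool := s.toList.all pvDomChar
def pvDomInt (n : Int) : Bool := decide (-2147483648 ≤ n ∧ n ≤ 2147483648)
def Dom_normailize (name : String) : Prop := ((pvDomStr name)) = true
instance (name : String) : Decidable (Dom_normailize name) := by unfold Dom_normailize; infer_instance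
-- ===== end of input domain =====

-- B replaces the enumerate loop (index-by-index += with per-char case split) by one closed-form
-- expression: upper the one-char head slice, lower the tail slice, concatenate once (idiomatic).


-- ===== PORT A =====
-- the loop body: index 0 → char.upper(), index ≥ 1 → char.lower(), appended to new_name
def normailizeStep (acc : List Char) (p : Int × Char) : List Char :=
  if p.1 == 0 then acc ++ PySem.Chars.upper [p.2]
  else if 1 ≤ p.1 then acc ++ PySem.Chars.lower [p.2]
  else acc

def normailize (name : String) : String :=
  String.ofList ((PySem.List.enumerate name.toList 0).foldl normailizeStep [])

-- ===== PORT B =====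
def normailize_alt (name : String) : String :=
  PySem.Str.upper (PySem.Str.slice name none (some 1)) ++
    PySem.Str.lower (PySem.Str.slice name (some 1) none)

-- ===== PRECONDITION & SPEC =====
def Spec_normailize (name : String) (out : String) : Prop := out = normailize_alt name
instance (name : String) (out : String) : Decidable (Spec_normailize name out) := by unfold Spec_normailize; infer_instance

-- ===== CLAIM (what is proved, stated in full; the proofs are below) =====
def Claim_equal_normailize : Prop := ∀ (name : String), Dom_normailize name → Spec_normailize name (normailize name)

-- ===== LEMMAS AND PROOFS =====

-- the tail of the loop (indices ≥ 1) appends lowerChar of every remaining character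
lemma normailize_fold_tail (xs : List Char) : ∀ (s : Int), 1 ≤ s → ∀ (acc : List Char),
    (PySem.List.enumerate xs s).foldl normailizeStep acc = acc ++ xs.map PySem.Chars.lowerChar := by
  induction xs with
  | nil => intro s _ acc; simp [PySem.List.enumerate_nil]
  | cons x xs ih =>
    intro s hs acc
    rw [PySem.List.enumerate_cons, List.foldl_cons]
    have h0 : (s == (0 : Int)) = false := by simp; omega
    rw [show normailizeStep acc (s, x) = acc ++ [PySem.Chars.lowerChar x] by
      simp [normailizeStep, h0, hs, PySem.Chars.lower]]
    rw [ih (s + 1) (by omega)]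
    simp

lemma normailize_toList (name : String) :
    (normailize name).toList =
      PySem.Chars.upper (name.toList.take 1) ++ PySem.Chars.lower (name.toList.drop 1) := by
  unfold normailize
  cases h : name.toList with
  | nil => simp [PySem.List.enumerate_nil, PySem.Chars.upper, PySem.Chars.lower]
  | cons c cs =>
    rw [PySem.List.enumerate_cons, List.foldl_cons]
    rw [show normailizeStep [] ((0 : Int), c) = [PySem.Chars.upperChar c] by
      simp [normailizeStep, PySem.Chars.upper]]
    simp only [show (0:Int)+1 = 1 from rfl]
    rw [normailize_fold_tail cs 1 (by omega)]
    simp [PySem.Chars.upper, PySem.Chars.lower]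

lemma normailize_alt_toList (name : String) :
    (normailize_alt name).toList =
      PySem.Chars.upper (name.toList.take 1) ++ PySem.Chars.lower (name.toList.drop 1) := by
  unfold normailize_alt
  simp only [PySem.Str.upper, PySem.Str.lower, PySem.Str.slice,
    PySem.Chars.slice_eq_listSlice, String.toList_append, String.toList_ofList,
    show ((1:Int)) = ((1:Nat):Int) from rfl,
    PySem.List.slice_to_natCast, PySem.List.slice_from_natCast]

-- ===== VERDICT (by name: the statement is the Claim_ definition above) =====
theorem normailize_spec : Claim_equal_normailize := by
  intro name _
  unfold Spec_normailize
  have h := (normailize_toList name).trans (normailize_alt_toList name).symm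
  exact String.toList_inj.mp h
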